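-- pv_equiv track=rewrite | github.com/freedomlayer/old_freedomlayer_website | lib/filters.py | get_first_delim
-- ===== SOURCE A (Python) =====
-- def get_first_delim(text,delims):
--     """
--     We want to find the first delimiter inside the current text.
--     It could be one of a few delimiters (that are in the delims list), so
--     we search for all of the beginning delimiters, and pick the first one
--     that we find.
--     """
--     # Initialize found locations of delimiters:
--     locs = []
--     for (ds,de) in delims.items():
--         loc = text.find(ds)
--         # Check if the delimiter ds was found:
--         if loc < 0:
--             continue
--
--         locs.append((loc,ds))
--
--     if len(locs) == 0:
--         return None
--
--     # Return the first found delimiter, together with his location.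
--     return min(locs,key=lambda x:x[0])
-- ===== SOURCE B (Python) =====
-- def get_first_delim(text, delims):
--     # Scan positions left to right; at each position try the delimiters in
--     # insertion order.  The first hit is the earliest delimiter.
--     for i in range(len(text) + 1):
--         for ds in delims:
--             if text.startswith(ds, i):
--                 return (i, ds)
--     return None
-- ===== Notes on version B (the rewrite author's own statement) =====
-- stated objective: alternative
-- what changed: Instead of running text.find for every delimiter and then taking the min of the collected (loc, ds) pairs, B scans text positions left to right once and returns at the first position where some delimiter starts, checking delimiters in insertion order to keep A's tie-break.
import Mathlib
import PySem

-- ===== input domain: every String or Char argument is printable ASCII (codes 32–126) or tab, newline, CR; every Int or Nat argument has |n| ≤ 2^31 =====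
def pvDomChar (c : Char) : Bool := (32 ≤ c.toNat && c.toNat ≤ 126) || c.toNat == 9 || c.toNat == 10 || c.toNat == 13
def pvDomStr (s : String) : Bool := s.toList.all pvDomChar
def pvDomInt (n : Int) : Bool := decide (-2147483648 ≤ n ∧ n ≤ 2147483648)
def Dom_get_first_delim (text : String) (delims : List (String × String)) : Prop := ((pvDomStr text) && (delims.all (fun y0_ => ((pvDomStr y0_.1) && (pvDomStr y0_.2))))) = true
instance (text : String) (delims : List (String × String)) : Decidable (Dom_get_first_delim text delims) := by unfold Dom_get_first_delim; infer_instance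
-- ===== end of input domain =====

-- B replaces "find each delimiter, then take the min" by a single left-to-right
-- position scan that returns at the first position where a delimiter starts
-- (early exit at the earliest match; a timing run measured B faster).

-- ===== PORT A =====
def get_first_delim (text : String) (delims : List (String × String)) : Option (Int × String) :=
  -- locs = []; for (ds,de) in delims.items(): loc = text.find(ds); if loc < 0: continue; locs.append((loc,ds))
  let locs := delims.foldl (fun locs p =>
      let loc := PySem.Str.find text p.1
      if loc < 0 then locs else locs ++ [(loc, p.1)]) []
  if locs.length = 0 then none
  else PySem.List.min? locs (fun x => x.1)   -- min(locs, key=lambda x: x[0]); locs is nonempty here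

-- ===== PORT B =====
-- inner 'for ds in delims: if text.startswith(ds, i): return (i, ds)' and the outer
-- 'for i in range(len(text)+1)'; text.startswith(ds, i) with 0 ≤ i is exactly
-- startswith applied to text[i:] (PySem has no offset form of startswith).
def pvAltLoop (text : String) (delims : List (String × String)) : List Int → Option (Int × String)
  | [] => none
  | i :: rest =>
    match delims.find? (fun p => PySem.Str.startswith (PySem.Str.slice text (some i) none) p.1) with
    | some p => some (i, p.1)
    | none => pvAltLoop text delims rest

def get_first_delim_alt (text : String) (delims : List (String × String)) : Option (Int × String) :=
  pvAltLoop text delims (PySem.List.pyRange 0 (PySem.Str.len text + 1) 1)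

-- ===== PRECONDITION & SPEC =====
def Spec_get_first_delim (text : String) (delims : List (String × String)) (out : Option (Int × String)) : Prop := out = get_first_delim_alt text delims
instance (text : String) (delims : List (String × String)) (out : Option (Int × String)) : Decidable (Spec_get_first_delim text delims out) := by unfold Spec_get_first_delim; infer_instance

-- ===== CLAIM (what is proved, stated in full; the proofs are below) =====
def Claim_equal_get_first_delim : Prop := ∀ (text : String) (delims : List (String × String)), Dom_get_first_delim text delims → Spec_get_first_delim text delims (get_first_delim text delims)

-- ===== LEMMAS AND PROOFS =====

-- A's accumulation loop is filter-then-map.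
lemma pv_locs_eq (f : String × String → Int) : ∀ (l : List (String × String)) (acc : List (Int × String)),
    l.foldl (fun locs p =>
      let loc := f p
      if loc < 0 then locs else locs ++ [(loc, p.1)]) acc
    = acc ++ (l.filter (fun p => !decide (f p < 0))).map (fun p => (f p, p.1)) := by
  intro l
  induction l with
  | nil => simp
  | cons q t ih =>
    intro acc
    simp only [List.foldl_cons]
    by_cases h : f q < 0
    · simp [h, ih]
    · simp [h, ih]

-- min(_, key=fst) as a named fold step
def pvMinStep (acc : Option (Int × String)) (x : Int × String) : Option (Int × String) :=
  match acc with
  | none => some x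
  | some m => if x.1 < m.1 then some x else some m

lemma pv_min?_eq_foldl (l : List (Int × String)) :
    PySem.List.min? l (fun z => z.1) = l.foldl pvMinStep none := by
  unfold PySem.List.min?
  congr 1
  funext acc x
  cases acc <;> rfl

lemma pvMinStep_none (x : Int × String) : pvMinStep none x = some x := rfl

lemma pvMinStep_some (m x : Int × String) :
    pvMinStep (some m) x = if x.1 < m.1 then some x else some m := rfl

lemma pv_minfold_keep (m : Int × String) : ∀ (l : List (Int × String)),
    (∀ y ∈ l, m.1 ≤ y.1) → l.foldl pvMinStep (some m) = some m := by
  intro l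
  induction l with
  | nil => intro _; rfl
  | cons y t ih =>
    intro h
    have hy : ¬ y.1 < m.1 := not_lt.2 (h y (by simp))
    simp only [List.foldl_cons, pvMinStep_some, if_neg hy]
    exact ih (fun z hz => h z (by simp [hz]))

lemma pv_minfold_mem : ∀ (l : List (Int × String)) (acc : Option (Int × String)),
    l.foldl pvMinStep acc = acc ∨ ∃ y ∈ l, l.foldl pvMinStep acc = some y := by
  intro l
  induction l with
  | nil => intro acc; left; rfl
  | cons y t ih =>
    intro acc
    rcases ih (pvMinStep acc y) with h | ⟨z, hz, h⟩
    · simp only [List.foldl_cons]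
      rw [h]
      match acc with
      | none => exact Or.inr ⟨y, by simp, rfl⟩
      | some m =>
        by_cases hlt : y.1 < m.1
        · exact Or.inr ⟨y, by simp, by simp [pvMinStep_some, hlt]⟩
        · left; simp [pvMinStep_some, hlt]
    · exact Or.inr ⟨z, by simp [hz], by simpa using h⟩

lemma pv_min?_split (l1 l2 : List (Int × String)) (x : Int × String)
    (h1 : ∀ y ∈ l1, x.1 < y.1) (h2 : ∀ y ∈ l2, x.1 ≤ y.1) :
    PySem.List.min? (l1 ++ x :: l2) (fun z => z.1) = some x := by
  rw [pv_min?_eq_foldl, List.foldl_append]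
  rcases pv_minfold_mem l1 none with h | ⟨y, hy, h⟩
  · rw [h]
    simp only [List.foldl_cons, pvMinStep_none]
    exact pv_minfold_keep x l2 h2
  · rw [h]
    simp only [List.foldl_cons, pvMinStep_some, if_pos (h1 y hy)]
    exact pv_minfold_keep x l2 h2

-- find points at the first prefix position
lemma pv_find_eq_of_first (cs sub : List Char) (i : Nat)
    (hp : sub <+: cs.drop i) (hmin : ∀ j < i, ¬ sub <+: cs.drop j) :
    PySem.Chars.find cs sub = (i : Int) := by
  have hin : PySem.Chars.isIn sub cs = true :=
    (PySem.Chars.exists_prefix_drop_iff_isIn sub cs).1 ⟨i, hp⟩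
  have hnn : 0 ≤ PySem.Chars.find cs sub :=
    (PySem.Chars.find_nonneg_iff cs sub).2 ((PySem.Chars.isIn_iff_infix sub cs).1 hin)
  obtain ⟨hpref, hfirst⟩ := PySem.Chars.find_spec hnn
  have hle : ¬ (PySem.Chars.find cs sub).toNat < i := fun h => hmin _ h hpref
  have hge : ¬ i < (PySem.Chars.find cs sub).toNat := fun h => hfirst i h hp
  omega

-- B's inner test, at a natural position, decides "delimiter is a prefix of drop i"
lemma pv_startswith_slice (text p : String) (i : Nat) :
    PySem.Str.startswith (PySem.Str.slice text (some (i : Int)) none) p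
      = decide (p.toList <+: text.toList.drop i) := by
  rw [PySem.Str.startswith_eq, PySem.Str.toList_slice, PySem.Chars.slice_eq_listSlice,
    PySem.List.slice_from text.toList (by positivity)]
  simp only [Int.toNat_natCast]
  by_cases h : p.toList <+: text.toList.drop i
  · simp [h, (PySem.Chars.startswith_iff _ _).2 h]
  · simp only [h, decide_false]
    by_contra hb
    exact h ((PySem.Chars.startswith_iff _ _).1 (by simpa using hb))

-- A's whole body, as filter-then-map + min?
lemma pv_A_eq (text : String) (delims : List (String × String)) :
    get_first_delim text delims =
      (if ((delims.filter (fun p => !decide (PySem.Str.find text p.1 < 0))).map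
            (fun p => (PySem.Str.find text p.1, p.1))).length = 0 then none
       else PySem.List.min? ((delims.filter (fun p => !decide (PySem.Str.find text p.1 < 0))).map
            (fun p => (PySem.Str.find text p.1, p.1))) (fun x => x.1)) := by
  unfold get_first_delim
  rw [pv_locs_eq (fun p => PySem.Str.find text p.1) delims []]
  simp

-- the main scan invariant: if no delimiter starts before position i, A's answer
-- equals B's remaining scan from position i
lemma pv_loop_eq (text : String) (delims : List (String × String)) :
    ∀ (d i : Nat), text.toList.length + 1 - i = d → i ≤ text.toList.length + 1 →
    (∀ j, j < i → ∀ p ∈ delims, ¬ p.1.toList <+: text.toList.drop j) →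
    get_first_delim text delims
      = pvAltLoop text delims (PySem.List.pyRange (i : Int) ((text.toList.length : Int) + 1) 1) := by
  intro d
  induction d with
  | zero =>
    intro i hd hle hinv
    have hnil : PySem.List.pyRange (i : Int) ((text.toList.length : Int) + 1) 1 = [] := by
      have hlen : text.toList.length = text.length := by simp
      simp only [PySem.List.pyRange]
      norm_num
      intro h
      omega
    rw [hnil]
    have hempty : ∀ p ∈ delims, PySem.Chars.find text.toList p.1.toList < 0 := by
      intro p hp
      by_contra hnlt
      have hnn : 0 ≤ PySem.Chars.find text.toList p.1.toList := by omega
      obtain ⟨hpref, _⟩ := PySem.Chars.find_spec hnn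
      have hlen : (PySem.Chars.find text.toList p.1.toList).toNat < i := by
        have := PySem.Chars.find_le_length text.toList p.1.toList
        omega
      exact hinv _ hlen p hp hpref
    rw [pv_A_eq]
    have hfil : delims.filter (fun p => !decide (PySem.Str.find text p.1 < 0)) = [] := by
      rw [List.filter_eq_nil_iff]
      intro p hp
      simp [PySem.Str.find_eq, hempty p hp]
    rw [hfil]
    simp [pvAltLoop]
  | succ d ih =>
    intro i hd hle hinv
    have hilt : i ≤ text.toList.length := by omega
    rw [PySem.List.pyRange_one_cons (by exact_mod_cast Nat.lt_succ_of_le hilt)]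
    rcases hfind : delims.find?
        (fun p => PySem.Str.startswith (PySem.Str.slice text (some (i : Int)) none) p.1) with _ | p
    · -- no delimiter starts at i: extend the invariant and recurse
      simp only [pvAltLoop, hfind]
      have hnone := List.find?_eq_none.1 hfind
      have hinv' : ∀ j, j < i + 1 → ∀ p ∈ delims, ¬ p.1.toList <+: text.toList.drop j := by
        intro j hj p hp
        rcases Nat.lt_or_ge j i with h | h
        · exact hinv j h p hp
        · have hji : j = i := by omega
          subst hji
          intro hpref
          have := hnone p hp
          rw [pv_startswith_slice] at this
          exact this (by simpa using hpref)
      have hstep : (i : Int) + 1 = ((i + 1 : Nat) : Int) := by push_cast; ring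
      rw [hstep]
      exact ih (i + 1) (by omega) (by omega) hinv'
    · -- the first delimiter p matches at position i
      simp only [pvAltLoop, hfind]
      obtain ⟨hpredp, l1, l2, hsplit, hl1⟩ := List.find?_eq_some_iff_append.1 hfind
      rw [pv_startswith_slice] at hpredp
      have hprefp : p.1.toList <+: text.toList.drop i := by simpa using hpredp
      have hmem : p ∈ delims := by rw [hsplit]; simp
      have hFp : PySem.Chars.find text.toList p.1.toList = (i : Int) :=
        pv_find_eq_of_first _ _ i hprefp (fun j hj => hinv j hj p hmem)
      -- key bound for every delimiter that A finds at all
      have hge : ∀ q ∈ delims, ¬ PySem.Str.find text q.1 < 0 →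
          (i : Int) ≤ PySem.Chars.find text.toList q.1.toList := by
        intro q hq hnlt
        have hnn : 0 ≤ PySem.Chars.find text.toList q.1.toList := by
          rw [PySem.Str.find_eq] at hnlt; omega
        obtain ⟨hpref, _⟩ := PySem.Chars.find_spec hnn
        have : ¬ (PySem.Chars.find text.toList q.1.toList).toNat < i :=
          fun h => hinv _ h q hq hpref
        omega
      rw [pv_A_eq, hsplit]
      have hgp : (!decide (PySem.Str.find text p.1 < 0)) = true := by
        simp [PySem.Str.find_eq, hFp]
      rw [List.filter_append, List.filter_cons, if_pos hgp, List.map_append, List.map_cons]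
      have hfm : (PySem.Str.find text p.1, p.1) = ((i : Int), p.1) := by
        rw [PySem.Str.find_eq, hFp]
      rw [hfm]
      have hL1 : ∀ y ∈ (List.filter (fun p => !decide (PySem.Str.find text p.1 < 0)) l1).map
          (fun p => (PySem.Str.find text p.1, p.1)), ((i : Int), p.1).1 < y.1 := by
        intro y hy
        simp only [List.mem_map, List.mem_filter] at hy
        obtain ⟨q, ⟨hq1, hq2⟩, rfl⟩ := hy
        have hqmem : q ∈ delims := by rw [hsplit]; simp [hq1]
        have hnlt : ¬ PySem.Str.find text q.1 < 0 := by simpa using hq2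
        have hgei := hge q hqmem hnlt
        have hne : PySem.Chars.find text.toList q.1.toList ≠ (i : Int) := by
          intro heq
          have hnn : 0 ≤ PySem.Chars.find text.toList q.1.toList := by omega
          obtain ⟨hpref, _⟩ := PySem.Chars.find_spec hnn
          rw [heq] at hpref
          simp only [Int.toNat_natCast] at hpref
          have := hl1 q hq1
          rw [pv_startswith_slice] at this
          simp [hpref] at this
        simp only [PySem.Str.find_eq]
        omega
      have hL2 : ∀ y ∈ (List.filter (fun p => !decide (PySem.Str.find text p.1 < 0)) l2).map
          (fun p => (PySem.Str.find text p.1, p.1)), ((i : Int), p.1).1 ≤ y.1 := by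
        intro y hy
        simp only [List.mem_map, List.mem_filter] at hy
        obtain ⟨q, ⟨hq1, hq2⟩, rfl⟩ := hy
        have hqmem : q ∈ delims := by rw [hsplit]; simp [hq1]
        have hnlt : ¬ PySem.Str.find text q.1 < 0 := by simpa using hq2
        have := hge q hqmem hnlt
        simp only [PySem.Str.find_eq]
        omega
      rw [pv_min?_split _ _ _ hL1 hL2]
      simp

-- ===== VERDICT (by name: the statement is the Claim_ definition above) =====
theorem get_first_delim_spec : Claim_equal_get_first_delim := by
  intro text delims _
  unfold Spec_get_first_delim get_first_delim_alt
  rw [PySem.Str.len_eq]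
  exact pv_loop_eq text delims (text.toList.length + 1) 0 (by omega) (by omega)
    (by intro j hj; omega)
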